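-- pv_equiv track=rewrite | github.com/human-technology-institute/structure_learning | src/structure_learning/proposals/partition/partition_proposal.py | _calculate_partition_transitions
-- ===== SOURCE A (Python) =====
-- def _calculate_partition_transitions(n, party, posy):
--     m = len(party)
--     hole_possibs = [0] * n
--     for k in range(n):
--         node_element = posy[k]
--         if party[node_element] == 1:  # Nodes in a partition element of size 1 cannot move to the neighbouring holes
--             hole_possibs[k] = m - 1
--             if node_element < m - 1:
--                 if party[node_element + 1] == 1:  # And if the next partition element is also size 1
--                     hole_possibs[k] = m - 2  # We only allow them to jump to the left to count the swap only once
--         elif party[node_element] == 2:  # Nodes in a partition element of size 2 cannot move to the hole on the left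
--             hole_possibs[k] = m  # Since this would count the same splitting twice
--         else:
--             hole_possibs[k] = m + 1
--     return hole_possibs
-- ===== SOURCE B (Python) =====
-- def _calculate_partition_transitions(n, party, posy):
--     m = len(party)
--     element_possibs = []
--     for e in range(m):
--         if party[e] == 1:
--             v = m - 1
--             if e < m - 1 and party[e + 1] == 1:
--                 v = m - 2
--         elif party[e] == 2:
--             v = m
--         else:
--             v = m + 1
--         element_possibs.append(v)
--     return [element_possibs[posy[k]] for k in range(n)]
-- ===== Notes on version B (the rewrite author's own statement) =====
-- stated objective: alternative
-- what changed: B replaces A's single node-indexed pass (branch logic re-evaluated per node) by an element-indexed table of per-element hole counts built once, followed by a node-indexed lookup pass.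
-- intended difference: On inputs where some posy[k] (k < n) equals -1 and both the first and the last element of party equal 1, A's negative-index wraparound treats party[0] as the 'next' element after the last partition element and returns m-2 at that position (even -1 when m=1), while B returns m-1, the intended value since the last partition element has no right neighbour. — e.g. on _calculate_partition_transitions(1, [1], [-1]): A returns [-1], B returns [0]
import Mathlib
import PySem

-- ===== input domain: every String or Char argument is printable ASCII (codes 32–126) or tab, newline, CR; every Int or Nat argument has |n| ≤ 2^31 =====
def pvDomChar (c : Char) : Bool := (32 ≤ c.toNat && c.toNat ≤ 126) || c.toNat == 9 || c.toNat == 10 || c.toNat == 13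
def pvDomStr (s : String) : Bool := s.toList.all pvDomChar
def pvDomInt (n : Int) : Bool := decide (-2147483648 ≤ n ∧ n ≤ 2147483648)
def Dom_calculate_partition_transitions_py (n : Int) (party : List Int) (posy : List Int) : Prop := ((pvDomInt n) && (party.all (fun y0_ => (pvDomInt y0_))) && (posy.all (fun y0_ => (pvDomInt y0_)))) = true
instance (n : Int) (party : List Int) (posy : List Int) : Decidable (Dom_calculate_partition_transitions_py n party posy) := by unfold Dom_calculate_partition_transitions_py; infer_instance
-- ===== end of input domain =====

-- B replaces A's single node-indexed pass by an element-indexed table of per-element hole counts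
-- built once plus a node-indexed lookup pass (objective: alternative decomposition, same cost);
-- on inputs where some posy[k] = -1 and party's first and last elements are both 1, A's
-- negative-index wraparound returns m-2 at that node while B returns the intended m-1 (see D_ below).


-- ===== PORT A =====
def calculate_partition_transitions_py (n : Int) (party : List Int) (posy : List Int) : List Int :=
  let m : Int := (party.length : Int)
  let hole0 : List Int := List.replicate n.toNat 0
  (PySem.List.pyRange 0 n 1).foldl (fun hp k =>
    let ne := PySem.List.pyGetD posy k 0
    let v : Int :=
      if PySem.List.pyGetD party ne 0 = 1 then
        if ne < m - 1 then
          if PySem.List.pyGetD party (ne + 1) 0 = 1 then m - 2 else m - 1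
        else m - 1
      else if PySem.List.pyGetD party ne 0 = 2 then m
      else m + 1
    PySem.List.pySetD hp k v) hole0

-- ===== PORT B =====
-- B-side helper: the per-element table ('element_possibs' in Source B)
def pvTable (party : List Int) : List Int :=
  let m : Int := (party.length : Int)
  (List.range party.length).map (fun e =>
    if party.getD e 0 = 1 then
      if decide ((e : Int) < m - 1) && decide (party.getD (e + 1) 0 = 1) then m - 2 else m - 1
    else if party.getD e 0 = 2 then m
    else m + 1)

def calculate_partition_transitions_py_alt (n : Int) (party : List Int) (posy : List Int) : List Int :=
  (PySem.List.pyRange 0 n 1).map (fun k =>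
    PySem.List.pyGetD (pvTable party) (PySem.List.pyGetD posy k 0) 0)

-- ===== PRECONDITION & SPEC =====
-- Pre_ excludes exactly the inputs where Python A raises IndexError: a loop index k < n beyond
-- posy, or a posy entry outside [-len(party), len(party)).
def Pre_calculate_partition_transitions_py (n : Int) (party : List Int) (posy : List Int) : Prop :=
  n ≤ (posy.length : Int) ∧
  ∀ x ∈ posy.take n.toNat, -(party.length : Int) ≤ x ∧ x < (party.length : Int)
instance (n : Int) (party : List Int) (posy : List Int) : Decidable (Pre_calculate_partition_transitions_py n party posy) := by unfold Pre_calculate_partition_transitions_py; infer_instance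

def pvWitness_calculate_partition_transitions_py : Int × List Int × List Int := (2, [1, 2], [0, 1])

-- On inputs where some posy[k] (k < n) equals -1 and both the first and the last element of party
-- equal 1, A's negative-index wraparound treats party[0] as the element after the last partition
-- element and returns m-2 at that node (even -1 when m=1), while B returns m-1, the intended value
-- since the last partition element has no right neighbour.
def D_calculate_partition_transitions_py (n : Int) (party : List Int) (posy : List Int) : Prop :=
  (-1 : Int) ∈ posy.take n.toNat ∧ party.getLast? = some 1 ∧ party.head? = some 1
instance (n : Int) (party : List Int) (posy : List Int) : Decidable (D_calculate_partition_transitions_py n party posy) := by unfold D_calculate_partition_transitions_py; infer_instance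

def Spec_calculate_partition_transitions_py (n : Int) (party : List Int) (posy : List Int) (out : List Int) : Prop := ¬ D_calculate_partition_transitions_py n party posy → out = calculate_partition_transitions_py_alt n party posy
instance (n : Int) (party : List Int) (posy : List Int) (out : List Int) : Decidable (Spec_calculate_partition_transitions_py n party posy out) := by unfold Spec_calculate_partition_transitions_py; infer_instance

def pvDiffWitness_calculate_partition_transitions_py : Int × List Int × List Int := (1, [1], [-1])
def pvDiffWitnessOut_calculate_partition_transitions_py : (List Int) × (List Int) := ([-1], [0])

-- ===== CLAIM (what is proved, stated in full; the proofs are below) =====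
def Claim_unchanged_calculate_partition_transitions_py : Prop := ∀ (n : Int) (party : List Int) (posy : List Int), Dom_calculate_partition_transitions_py n party posy → Pre_calculate_partition_transitions_py n party posy → Spec_calculate_partition_transitions_py n party posy (calculate_partition_transitions_py n party posy)
def Claim_changed_calculate_partition_transitions_py : Prop := Dom_calculate_partition_transitions_py (pvDiffWitness_calculate_partition_transitions_py.1) (pvDiffWitness_calculate_partition_transitions_py.2.1) (pvDiffWitness_calculate_partition_transitions_py.2.2) ∧ Pre_calculate_partition_transitions_py (pvDiffWitness_calculate_partition_transitions_py.1) (pvDiffWitness_calculate_partition_transitions_py.2.1) (pvDiffWitness_calculate_partition_transitions_py.2.2) ∧ D_calculate_partition_transitions_py (pvDiffWitness_calculate_partition_transitions_py.1) (pvDiffWitness_calculate_partition_transitions_py.2.1) (pvDiffWitness_calculate_partition_transitions_py.2.2) ∧ calculate_partition_transitions_py (pvDiffWitness_calculate_partition_transitions_py.1) (pvDiffWitness_calculate_partition_transitions_py.2.1) (pvDiffWitness_calculate_partition_transitions_py.2.2) = pvDiffWitnessOut_calculate_partition_transitions_py.1 ∧ calculate_partition_transitions_py_alt (pvDiffWitness_calculate_partition_transitions_py.1)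 (pvDiffWitness_calculate_partition_transitions_py.2.1) (pvDiffWitness_calculate_partition_transitions_py.2.2) = pvDiffWitnessOut_calculate_partition_transitions_py.2 ∧ pvDiffWitnessOut_calculate_partition_transitions_py.1 ≠ pvDiffWitnessOut_calculate_partition_transitions_py.2
def Claim_exact_calculate_partition_transitions_py : Prop := ∀ (n : Int) (party : List Int) (posy : List Int), Dom_calculate_partition_transitions_py n party posy → Pre_calculate_partition_transitions_py n party posy → D_calculate_partition_transitions_py n party posy → calculate_partition_transitions_py n party posy ≠ calculate_partition_transitions_py_alt n party posy

-- ===== LEMMAS AND PROOFS =====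

-- A's per-node value as a function of the node's element index (exactly A's branch logic)
def pvFA (party : List Int) (ne : Int) : Int :=
  let m : Int := (party.length : Int)
  if PySem.List.pyGetD party ne 0 = 1 then
    if ne < m - 1 then
      if PySem.List.pyGetD party (ne + 1) 0 = 1 then m - 2 else m - 1
    else m - 1
  else if PySem.List.pyGetD party ne 0 = 2 then m
  else m + 1

lemma pv_setfold (g : Nat → Int) : ∀ (N : Nat) (acc : List Int), N ≤ acc.length →
    (List.range N).foldl (fun hp k => hp.set k (g k)) acc = (List.range N).map g ++ acc.drop N := by
  intro N
  induction N with
  | zero => simp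
  | succ N ih =>
    intro acc hlen
    have hN : N < acc.length := by omega
    rw [List.range_succ, List.foldl_append, ih acc (by omega), List.map_append]
    simp only [List.foldl_cons, List.foldl_nil, List.map_cons, List.map_nil]
    rw [List.set_append]
    simp only [List.length_map, List.length_range, lt_irrefl, Nat.sub_self]
    rw [show acc.drop N = acc[N] :: acc.drop (N + 1) from (List.getElem_cons_drop hN).symm]
    simp only [List.set_cons_zero, List.append_assoc, List.singleton_append, if_false]

lemma pvA_eq_map (n : Int) (party posy : List Int) :
    calculate_partition_transitions_py n party posy
      = (PySem.List.pyRange 0 n 1).map (fun k => pvFA party (PySem.List.pyGetD posy k 0)) := by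
  show (PySem.List.pyRange 0 n 1).foldl
      (fun hp k => PySem.List.pySetD hp k (pvFA party (PySem.List.pyGetD posy k 0)))
      (List.replicate n.toNat 0) = _
  rw [PySem.List.pyRange_one 0 n]
  simp only [zero_add, Int.sub_zero, List.foldl_map, List.map_map]
  have key := pv_setfold (fun k : Nat => pvFA party (PySem.List.pyGetD posy (k : Int) 0)) n.toNat
      (List.replicate n.toNat 0) (by simp)
  simp only [PySem.List.pySetD_natCast]
  rw [key]
  simp [Function.comp_def]

-- pyGetD with a negative in-range index reads from the end
lemma pv_pyGetD_neg (xs : List Int) (i : Int) (d : Int) (h0 : i < 0)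
    (h1 : -(xs.length : Int) ≤ i) :
    PySem.List.pyGetD xs i d = xs.getD ((xs.length : Int) + i).toNat d := by
  have hk0 : 0 < (-i).toNat := by omega
  have hk1 : (-i).toNat ≤ xs.length := by omega
  have hi : i = -(((-i).toNat : Nat) : Int) := by omega
  rw [hi, PySem.List.pyGetD_neg_natCast xs ((-i).toNat) d hk0 hk1,
      show (((xs.length : Int)) + -(((-i).toNat : Nat) : Int)).toNat = xs.length - (-i).toNat by omega,
      List.getD_eq_getElem xs d (by omega)]

lemma pv_len_table (party : List Int) : (pvTable party).length = party.length := by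
  simp [pvTable]

lemma pv_table_getD (party : List Int) (e : Nat) (he : e < party.length) :
    (pvTable party).getD e 0 =
      (if party.getD e 0 = 1 then
        if decide ((e : Int) < (party.length : Int) - 1) && decide (party.getD (e + 1) 0 = 1)
          then (party.length : Int) - 2 else (party.length : Int) - 1
      else if party.getD e 0 = 2 then (party.length : Int)
      else (party.length : Int) + 1) := by
  rw [List.getD_eq_getElem _ _ (by rw [pv_len_table]; omega)]
  simp [pvTable]

-- pointwise agreement outside the -1/wraparound corner
lemma pv_point (party : List Int) (x : Int)
    (hlo : -(party.length : Int) ≤ x) (hhi : x < (party.length : Int))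
    (hcorner : ¬(x = -1 ∧ party.getLast? = some 1 ∧ party.head? = some 1)) :
    pvFA party x = PySem.List.pyGetD (pvTable party) x 0 := by
  by_cases hx : 0 ≤ x
  · -- nonnegative element index: identical branch logic
    have hxe : x = ((x.toNat : Nat) : Int) := by omega
    rw [hxe]
    rw [show PySem.List.pyGetD (pvTable party) ((x.toNat : Nat) : Int) 0
          = (pvTable party).getD x.toNat 0 from PySem.List.pyGetD_natCast _ _ _]
    rw [pv_table_getD party x.toNat (by omega)]
    unfold pvFA
    rw [show PySem.List.pyGetD party ((x.toNat : Nat) : Int) 0 = party.getD x.toNat 0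
          from PySem.List.pyGetD_natCast _ _ _]
    rw [show (((x.toNat : Nat) : Int) + 1) = (((x.toNat + 1 : Nat) : Nat) : Int) by push_cast; ring]
    rw [show PySem.List.pyGetD party (((x.toNat + 1 : Nat) : Nat) : Int) 0 = party.getD (x.toNat + 1) 0
          from PySem.List.pyGetD_natCast _ _ _]
    simp only [Bool.and_eq_true, decide_eq_true_eq]
    split_ifs <;> first | rfl | tauto
  · -- negative element index: wraps to element e = m + x
    replace hx : x < 0 := by omega
    have hm1 : 1 ≤ party.length := by omega
    have hee : ((party.length : Int) + x).toNat < party.length := by omega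
    have hB : PySem.List.pyGetD (pvTable party) x 0
        = (pvTable party).getD ((party.length : Int) + x).toNat 0 := by
      rw [pv_pyGetD_neg (pvTable party) x 0 hx (by rw [pv_len_table]; exact hlo),
          pv_len_table]
    rw [hB, pv_table_getD party _ hee]
    unfold pvFA
    have hcond : x < (party.length : Int) - 1 := by omega
    rw [pv_pyGetD_neg party x 0 hx hlo]
    by_cases hj : x = -1
    · -- e = m-1: A consults party[0] by wraparound, B takes no right neighbour
      have hE : ((party.length : Int) + x).toNat = party.length - 1 := by omega
      have hcB : ¬ (((party.length - 1 : Nat) : Nat) : Int) < (party.length : Int) - 1 := by omega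
      have hA2 : PySem.List.pyGetD party (x + 1) 0 = party.getD 0 0 := by
        rw [hj]; norm_num [PySem.List.pyGetD_zero]
      rw [hE, hA2]
      by_cases p1 : party.getD (party.length - 1) 0 = 1
      · -- last element has size 1; ¬D_ forces party[0] ≠ 1
        have hlast : party.getLast? = some 1 := by
          rw [List.getLast?_eq_getElem?, List.getElem?_eq_some_iff]
          refine ⟨by omega, ?_⟩
          rw [← List.getD_eq_getElem party 0 (by omega)]
          exact p1
        have hhead : ¬ party.head? = some 1 := fun hh => hcorner ⟨hj, hlast, hh⟩
        have hne : ¬ party.getD 0 0 = 1 := by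
          intro hc
          apply hhead
          rw [List.head?_eq_getElem?, List.getElem?_eq_some_iff]
          refine ⟨by omega, ?_⟩
          rw [← List.getD_eq_getElem party 0 (by omega)]
          exact hc
        have p1' := p1
        have hne' := hne
        simp only [List.getD_eq_getElem?_getD] at p1' hne'
        simp [p1', hne', hcond]
        exact fun hcc => absurd hcc hcB
      · have p1' := p1
        simp only [List.getD_eq_getElem?_getD] at p1'
        simp [p1']
    · -- x ≤ -2: e < m-1 and the 'next element' reads coincide
      have hcB : ((((party.length : Int) + x).toNat : Nat) : Int) < (party.length : Int) - 1 := by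
        omega
      have hA2 : PySem.List.pyGetD party (x + 1) 0
          = party.getD (((party.length : Int) + x).toNat + 1) 0 := by
        rw [pv_pyGetD_neg party (x + 1) 0 (by omega) (by omega),
            show ((party.length : Int) + (x + 1)).toNat = ((party.length : Int) + x).toNat + 1
              by omega]
      rw [hA2]
      simp only [hcond, if_pos, hcB, decide_true, Bool.true_and, decide_eq_true_eq]

lemma pv_mem_take (n : Int) (posy : List Int) (k : Int) (h0 : 0 ≤ k) (h1 : k < n)
    (h2 : n ≤ (posy.length : Int)) :
    PySem.List.pyGetD posy k 0 ∈ posy.take n.toNat := by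
  have hk : k.toNat < posy.length := by omega
  have hx : PySem.List.pyGetD posy k 0 = posy[k.toNat]'hk :=
    PySem.List.pyGetD_eq_getElem posy 0 h0 (by omega)
  have hkt : k.toNat < (posy.take n.toNat).length := by simp; omega
  have : (posy.take n.toNat)[k.toNat]'hkt = posy[k.toNat] := List.getElem_take
  rw [hx, ← this]
  exact List.getElem_mem hkt

-- ===== VERDICT (by name: the statement is the Claim_ definition above) =====
theorem calculate_partition_transitions_py_spec : Claim_unchanged_calculate_partition_transitions_py := by
  intro n party posy _ hPre hnD
  obtain ⟨hn, hbnd⟩ := hPre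
  rw [pvA_eq_map]
  unfold calculate_partition_transitions_py_alt
  apply List.map_congr_left
  intro k hk
  rw [PySem.List.mem_pyRange_one] at hk
  have hmem := pv_mem_take n posy k hk.1 hk.2 hn
  obtain ⟨hlo, hhi⟩ := hbnd _ hmem
  apply pv_point party _ hlo hhi
  rintro ⟨hx1, hl, hh⟩
  exact hnD ⟨hx1 ▸ hmem, hl, hh⟩

theorem calculate_partition_transitions_py_changed : Claim_changed_calculate_partition_transitions_py := by
  unfold Claim_changed_calculate_partition_transitions_py; decide

theorem calculate_partition_transitions_py_tight : Claim_exact_calculate_partition_transitions_py := by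
  intro n party posy _ hPre hD heq
  obtain ⟨hn, _⟩ := hPre
  obtain ⟨hmem, hlast, hhead⟩ := hD
  obtain ⟨k0, hk0, hval⟩ := List.getElem_of_mem hmem
  have hk0p : k0 < posy.length := by
    have := hk0; simp at this; omega
  have hk0n : (k0 : Int) < n := by
    have := hk0; simp at this; omega
  have hm1 : 1 ≤ party.length := by
    cases party with
    | nil => simp at hlast
    | cons a l => simp
  have hpos : posy[k0]'hk0p = -1 := by
    rw [← hval]; exact (List.getElem_take).symm
  have hgx : PySem.List.pyGetD posy ((k0 : Nat) : Int) 0 = -1 := by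
    rw [PySem.List.pyGetD_eq_getElem posy 0 (by omega) (by exact_mod_cast hk0p)]
    simpa using hpos
  have hpl : party.getD (party.length - 1) 0 = 1 := by
    rw [List.getLast?_eq_getElem?, List.getElem?_eq_some_iff] at hlast
    obtain ⟨h1, h2⟩ := hlast
    rw [List.getD_eq_getElem party 0 (by omega)]
    exact h2
  have hph : party.getD 0 0 = 1 := by
    rw [List.head?_eq_getElem?, List.getElem?_eq_some_iff] at hhead
    obtain ⟨h1, h2⟩ := hhead
    rw [List.getD_eq_getElem party 0 (by omega)]
    exact h2
  -- evaluate both sides at node k0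
  have h := congrArg (fun l => PySem.List.pyGetD l ((k0 : Nat) : Int) 0) heq
  rw [pvA_eq_map] at h
  unfold calculate_partition_transitions_py_alt at h
  simp only at h
  rw [PySem.List.pyGetD_map_pyRange_of_nonneg _ n _ _ (by omega) hk0n,
      PySem.List.pyGetD_map_pyRange_of_nonneg _ n _ _ (by omega) hk0n] at h
  rw [hgx] at h
  -- A's value at node k0 is m-2
  have hA : pvFA party (-1) = (party.length : Int) - 2 := by
    unfold pvFA
    have h1 : PySem.List.pyGetD party (-1) 0 = 1 := by
      rw [pv_pyGetD_neg party (-1) 0 (by omega) (by omega),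
          show ((party.length : Int) + -1).toNat = party.length - 1 by omega]
      exact hpl
    have h2 : PySem.List.pyGetD party (-1 + 1) 0 = 1 := by
      norm_num [PySem.List.pyGetD_zero]
      exact hph
    simp only [h1, h2, if_pos]
    rw [if_pos (show (-1 : Int) < (party.length : Int) - 1 by omega)]
  -- B's value at node k0 is m-1
  have hB : PySem.List.pyGetD (pvTable party) (-1) 0 = (party.length : Int) - 1 := by
    rw [pv_pyGetD_neg (pvTable party) (-1) 0 (by omega) (by rw [pv_len_table]; omega),
        pv_len_table,
        show ((party.length : Int) + -1).toNat = party.length - 1 by omega,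
        pv_table_getD party (party.length - 1) (by omega)]
    have hc : ¬ (((party.length - 1 : Nat) : Nat) : Int) < (party.length : Int) - 1 := by omega
    have hpl' := hpl
    simp only [List.getD_eq_getElem?_getD] at hpl'
    simp [hpl', hc]
  rw [hA, hB] at h
  omega
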